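-- pv_equiv track=rewrite | github.com/build4self/jobtailorai-beta | backend/lambda-functions/ai-handler/prompt_template.py | extract_job_keywords
-- ===== SOURCE A (Python) =====
-- def extract_job_keywords(job_desc):
--     """Extract key technical skills, tools, and requirements from job description"""
--     if not job_desc or not job_desc.strip():
--         return []
--
--     tech_patterns = [
--         'Python', 'Java', 'JavaScript', 'React', 'Node.js', 'AWS', 'Docker', 'Kubernetes',
--         'SQL', 'MongoDB', 'PostgreSQL', 'Git', 'CI/CD', 'Agile', 'Scrum', 'REST API',
--         'GraphQL', 'TypeScript', 'Vue.js', 'Angular', 'Spring', 'Django', 'Flask',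
--         'Microservices', 'DevOps', 'Jenkins', 'Terraform', 'Linux', 'Machine Learning',
--         'Data Science', 'Analytics', 'Tableau', 'Power BI', 'Spark', 'Hadoop',
--         'Azure', 'GCP', 'Redis', 'Elasticsearch', 'Kafka', 'RabbitMQ', 'Nginx',
--         'Apache', 'Tomcat', 'Maven', 'Gradle', 'Webpack', 'Babel', 'Jest',
--         'Cypress', 'Selenium', 'JUnit', 'Mockito', 'Pandas', 'NumPy', 'TensorFlow',
--         'PyTorch', 'Scikit-learn', 'Jupyter', 'R', 'Scala', 'Go', 'Rust',
--         'C++', 'C#', '.NET', 'PHP', 'Ruby', 'Rails', 'Laravel', 'Express',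
--         'FastAPI', 'Celery', 'Airflow', 'Snowflake', 'BigQuery', 'Redshift',
--         'DynamoDB', 'Cassandra', 'Neo4j', 'Prometheus', 'Grafana', 'Splunk',
--         'New Relic', 'Datadog', 'CloudFormation', 'CDK', 'Ansible', 'Puppet',
--         'Chef', 'Vagrant', 'Helm', 'Istio', 'OpenShift', 'EKS', 'ECS',
--         'Lambda', 'S3', 'EC2', 'RDS', 'CloudWatch', 'IAM', 'VPC', 'API Gateway'
--     ]
--
--     found_keywords = []
--     job_lower = job_desc.lower()
--
--     for keyword in tech_patterns:
--         if keyword.lower() in job_lower: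
--             found_keywords.append(keyword)
--
--     return found_keywords
-- ===== SOURCE B (Python) =====
-- _ROWS = (
--     "Python|Java|JavaScript|React|Node.js|AWS|Docker|Kubernetes",
--     "SQL|MongoDB|PostgreSQL|Git|CI/CD|Agile|Scrum|REST API",
--     "GraphQL|TypeScript|Vue.js|Angular|Spring|Django|Flask|Microservices",
--     "DevOps|Jenkins|Terraform|Linux|Machine Learning|Data Science|Analytics|Tableau",
--     "Power BI|Spark|Hadoop|Azure|GCP|Redis|Elasticsearch|Kafka",
--     "RabbitMQ|Nginx|Apache|Tomcat|Maven|Gradle|Webpack|Babel",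
--     "Jest|Cypress|Selenium|JUnit|Mockito|Pandas|NumPy|TensorFlow",
--     "PyTorch|Scikit-learn|Jupyter|R|Scala|Go|Rust|C++",
--     "C#|.NET|PHP|Ruby|Rails|Laravel|Express|FastAPI",
--     "Celery|Airflow|Snowflake|BigQuery|Redshift|DynamoDB|Cassandra|Neo4j",
--     "Prometheus|Grafana|Splunk|New Relic|Datadog|CloudFormation|CDK|Ansible",
--     "Puppet|Chef|Vagrant|Helm|Istio|OpenShift|EKS|ECS",
--     "Lambda|S3|EC2|RDS|CloudWatch|IAM|VPC|API Gateway",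
-- )
--
-- _KEYWORDS = [kw for row in _ROWS for kw in row.split("|")]
--
--
-- def extract_job_keywords(job_desc):
--     """Extract key technical skills, tools, and requirements from job description"""
--     if not job_desc or not job_desc.strip():
--         return []
--
--     text = job_desc.lower()
--
--     # index the lowercased keywords by their first character
--     by_first = {}
--     for kw in _KEYWORDS:
--         low = kw.lower()
--         by_first[low[0]] = by_first.get(low[0], []) + [low]
--
--     # single position-major pass over the text: at each position try only the
--     # keywords that start with this character, remembering which matched
--     hit = set()
--     for i, c in enumerate(text):
--         for k in by_first.get(c, []):
--             if text.startswith(k, i):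
--                 hit.add(k)
--
--     # emit the matched keywords in table order
--     return [kw for kw in _KEYWORDS if kw.lower() in hit]
-- ===== Notes on version B (the rewrite author's own statement) =====
-- stated objective: alternative
-- what changed: A stores the 100 keywords as a literal list and scans the text once per keyword with Python's substring containment; B stores them as pipe-separated row strings split once at load, builds a first-character index of the lowercased keywords, makes a single position-major pass over the text testing only that position's bucket as prefixes into a matched set, and emits the matched keywords in table order.
import Mathlib
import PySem

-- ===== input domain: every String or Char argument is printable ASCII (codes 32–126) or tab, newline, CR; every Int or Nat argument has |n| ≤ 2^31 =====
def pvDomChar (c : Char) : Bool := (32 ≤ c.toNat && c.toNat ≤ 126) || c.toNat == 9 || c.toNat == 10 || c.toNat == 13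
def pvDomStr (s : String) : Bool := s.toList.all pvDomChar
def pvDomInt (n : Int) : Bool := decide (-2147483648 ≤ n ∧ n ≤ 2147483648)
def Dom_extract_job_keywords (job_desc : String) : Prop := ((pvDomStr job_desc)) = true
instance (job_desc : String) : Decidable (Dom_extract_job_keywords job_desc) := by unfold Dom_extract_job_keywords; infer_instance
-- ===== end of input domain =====

-- B replaces A's per-keyword substring scans of the text by one position-major pass that
-- consults a first-character index of the lowercased keywords, collects matches in a set and
-- emits them in table order; the keyword table is kept as pipe-separated row strings split
-- once at load (objective: alternative).

-- ===== PORT A =====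
-- A's fixed keyword list, as the literal list A's Python holds
def techPatterns : List String := [
  "Python", "Java", "JavaScript", "React", "Node.js", "AWS", "Docker", "Kubernetes",
  "SQL", "MongoDB", "PostgreSQL", "Git", "CI/CD", "Agile", "Scrum", "REST API",
  "GraphQL", "TypeScript", "Vue.js", "Angular", "Spring", "Django", "Flask", "Microservices",
  "DevOps", "Jenkins", "Terraform", "Linux", "Machine Learning", "Data Science", "Analytics", "Tableau",
  "Power BI", "Spark", "Hadoop", "Azure", "GCP", "Redis", "Elasticsearch", "Kafka",
  "RabbitMQ", "Nginx", "Apache", "Tomcat", "Maven", "Gradle", "Webpack", "Babel",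
  "Jest", "Cypress", "Selenium", "JUnit", "Mockito", "Pandas", "NumPy", "TensorFlow",
  "PyTorch", "Scikit-learn", "Jupyter", "R", "Scala", "Go", "Rust", "C++",
  "C#", ".NET", "PHP", "Ruby", "Rails", "Laravel", "Express", "FastAPI",
  "Celery", "Airflow", "Snowflake", "BigQuery", "Redshift", "DynamoDB", "Cassandra", "Neo4j",
  "Prometheus", "Grafana", "Splunk", "New Relic", "Datadog", "CloudFormation", "CDK", "Ansible",
  "Puppet", "Chef", "Vagrant", "Helm", "Istio", "OpenShift", "EKS", "ECS",
  "Lambda", "S3", "EC2", "RDS", "CloudWatch", "IAM", "VPC", "API Gateway"]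

def extract_job_keywords (job_desc : String) : List String :=
  if job_desc = "" ∨ PySem.Str.strip job_desc = "" then []
  else
    let job_lower := PySem.Str.lower job_desc
    techPatterns.foldl
      (fun acc kw => if PySem.Str.isIn (PySem.Str.lower kw) job_lower then acc ++ [kw] else acc) []

-- ===== PORT B =====
-- B's keyword table: pipe-separated row strings, split once at load
-- ([kw for row in _ROWS for kw in row.split("|")] in Source B)
def kwRows : List String := [
  "Python|Java|JavaScript|React|Node.js|AWS|Docker|Kubernetes",
  "SQL|MongoDB|PostgreSQL|Git|CI/CD|Agile|Scrum|REST API",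
  "GraphQL|TypeScript|Vue.js|Angular|Spring|Django|Flask|Microservices",
  "DevOps|Jenkins|Terraform|Linux|Machine Learning|Data Science|Analytics|Tableau",
  "Power BI|Spark|Hadoop|Azure|GCP|Redis|Elasticsearch|Kafka",
  "RabbitMQ|Nginx|Apache|Tomcat|Maven|Gradle|Webpack|Babel",
  "Jest|Cypress|Selenium|JUnit|Mockito|Pandas|NumPy|TensorFlow",
  "PyTorch|Scikit-learn|Jupyter|R|Scala|Go|Rust|C++",
  "C#|.NET|PHP|Ruby|Rails|Laravel|Express|FastAPI",
  "Celery|Airflow|Snowflake|BigQuery|Redshift|DynamoDB|Cassandra|Neo4j",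
  "Prometheus|Grafana|Splunk|New Relic|Datadog|CloudFormation|CDK|Ansible",
  "Puppet|Chef|Vagrant|Helm|Istio|OpenShift|EKS|ECS",
  "Lambda|S3|EC2|RDS|CloudWatch|IAM|VPC|API Gateway"]

def kwList : List String := kwRows.flatMap (fun row => (PySem.Str.split? row "|").getD [])

def extract_job_keywords_alt (job_desc : String) : List String :=
  if job_desc = "" ∨ PySem.Str.strip job_desc = "" then []
  else
    let text := PySem.Str.lower job_desc
    -- by_first[low[0]] = by_first.get(low[0], []) + [low]; low[0] is the head of low's
    -- characters (exact here: every entry of B's table is nonempty)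
    let byFirst : PySem.Dict Char (List String) :=
      kwList.foldl (fun d kw =>
        d.modify ((PySem.Str.lower kw).toList.headD ' ') []
          (fun ls => ls ++ [PySem.Str.lower kw])) PySem.Dict.empty
    -- text.startswith(k, i) with 0 ≤ i is exactly: k is a prefix of the slice text[i:]
    let hit : PySem.Set String :=
      (PySem.List.enumerate text.toList 0).foldl (fun s ic =>
        (byFirst.getD ic.2 []).foldl
          (fun s2 k => if PySem.Str.startswith (PySem.Str.slice text (some ic.1) none) k
                       then PySem.Set.add s2 k else s2) s) []
    kwList.foldl
      (fun acc kw => if PySem.Set.contains hit (PySem.Str.lower kw) then acc ++ [kw] else acc) []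

-- ===== PRECONDITION & SPEC =====
def Spec_extract_job_keywords (job_desc : String) (out : List String) : Prop := out = extract_job_keywords_alt job_desc
instance (job_desc : String) (out : List String) : Decidable (Spec_extract_job_keywords job_desc out) := by unfold Spec_extract_job_keywords; infer_instance

-- ===== CLAIM (what is proved, stated in full; the proofs are below) =====
def Claim_equal_extract_job_keywords : Prop := ∀ (job_desc : String), Dom_extract_job_keywords job_desc → Spec_extract_job_keywords job_desc (extract_job_keywords job_desc)

-- ===== LEMMAS AND PROOFS =====

-- B's split-at-load table is exactly A's literal list (closed computation, row by row)
set_option maxRecDepth 100000 in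
set_option maxHeartbeats 1000000 in
lemma kwList_eq : kwList = techPatterns := by
  simp [-String.length_toList, kwList, kwRows, techPatterns, PySem.Str.split?,
    PySem.Chars.split?, PySem.Chars.splitOn, PySem.Chars.splitOn.go]

-- grouping loop: the bucket of c holds exactly the values of the entries keyed to c
lemma getD_group (L : List String) (key : String → Char) (val : String → String)
    (d : PySem.Dict Char (List String)) (c : Char) :
    (L.foldl (fun d kw => d.modify (key kw) [] (fun ls => ls ++ [val kw])) d).getD c [] =
      d.getD c [] ++ (L.filter (fun kw => key kw == c)).map val := by
  induction L generalizing d with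
  | nil => simp
  | cons h t ih =>
    simp only [List.foldl_cons, ih, PySem.Dict.getD_modify, List.filter_cons]
    by_cases hc : key h = c
    · simp [hc]
    · simp [hc, Ne.symm hc]

-- membership in B's inner loop (one position, that position's bucket)
lemma mem_inner_fold {α : Type} [BEq α] [LawfulBEq α] (lows : List α) (C : α → Bool)
    (s : PySem.Set α) (y : α) :
    y ∈ lows.foldl (fun s2 k => if C k then PySem.Set.add s2 k else s2) s ↔
      y ∈ s ∨ ∃ k ∈ lows, C k = true ∧ y = k := by
  induction lows generalizing s with
  | nil => simp
  | cons p t ih =>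
    simp only [List.foldl_cons, List.mem_cons]
    by_cases hC : C p = true
    · rw [if_pos hC, ih]
      simp only [PySem.Set.mem_add]
      constructor
      · rintro (h | ⟨k, hk, hCk, hy⟩)
        · rcases h with h | h
          · exact Or.inl h
          · exact Or.inr ⟨p, Or.inl rfl, hC, h⟩
        · exact Or.inr ⟨k, Or.inr hk, hCk, hy⟩
      · rintro (h | ⟨k, hk, hCk, hy⟩)
        · exact Or.inl (Or.inl h)
        · rcases hk with hk | hk
          · subst hk; exact Or.inl (Or.inr hy)
          · exact Or.inr ⟨k, hk, hCk, hy⟩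
    · rw [if_neg hC, ih]
      constructor
      · rintro (h | ⟨k, hk, hCk, hy⟩)
        · exact Or.inl h
        · exact Or.inr ⟨k, Or.inr hk, hCk, hy⟩
      · rintro (h | ⟨k, hk, hCk, hy⟩)
        · exact Or.inl h
        · rcases hk with hk | hk
          · subst hk; exact absurd hCk hC
          · exact Or.inr ⟨k, hk, hCk, hy⟩

-- membership in B's nested scan (all positions, each with its own bucket)
lemma mem_nested_fold {α β : Type} [BEq α] [LawfulBEq α] (pos : List β) (lows : β → List α)
    (C : β → α → Bool) (s0 : PySem.Set α) (y : α) :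
    y ∈ pos.foldl (fun s j => (lows j).foldl (fun s2 k => if C j k then PySem.Set.add s2 k else s2) s) s0 ↔
      y ∈ s0 ∨ ∃ j ∈ pos, ∃ k ∈ lows j, C j k = true ∧ y = k := by
  induction pos generalizing s0 with
  | nil => simp
  | cons j t ih =>
    simp only [List.foldl_cons, ih, mem_inner_fold, List.mem_cons]
    constructor
    · rintro ((h | ⟨k, hk, hC, hy⟩) | ⟨j2, hj2, hrest⟩)
      · exact Or.inl h
      · exact Or.inr ⟨j, Or.inl rfl, k, hk, hC, hy⟩
      · exact Or.inr ⟨j2, Or.inr hj2, hrest⟩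
    · rintro (h | ⟨j2, hj2, hrest⟩)
      · exact Or.inl (Or.inl h)
      · rcases hj2 with hj2 | hj2
        · subst hj2; exact Or.inl (Or.inr hrest)
        · exact Or.inr ⟨j2, hj2, hrest⟩

-- every keyword's lowering is a nonempty string (closed fact about the literal list)
set_option maxRecDepth 100000 in
lemma techPatterns_lower_ne_nil : ∀ kw ∈ techPatterns, (PySem.Str.lower kw).toList ≠ [] := by decide

-- bounded prefix-position search = Python's substring test, for nonempty sub
lemma exists_pos_prefix_iff_isIn (sub s : List Char) (hsub : sub ≠ []) :
    (∃ j ∈ PySem.List.pyRange 0 (s.length : Int) 1, sub <+: s.drop j.toNat) ↔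
      PySem.Chars.isIn sub s = true := by
  rw [← PySem.Chars.exists_prefix_drop_iff_isIn]
  constructor
  · rintro ⟨j, _, hpre⟩; exact ⟨j.toNat, hpre⟩
  · rintro ⟨j, hpre⟩
    by_cases hj : j < s.length
    · refine ⟨(j : Int), ?_, by simpa using hpre⟩
      rw [PySem.List.mem_pyRange_one]
      omega
    · exfalso
      rw [List.drop_eq_nil_of_le (by omega)] at hpre
      exact hsub (List.prefix_nil.mp hpre)

-- B's hit-set membership for a keyword = A's substring test
lemma contains_hit_iff (jd : String) (kw : String) (hkw : kw ∈ techPatterns) :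
    PySem.Set.contains
      ((PySem.List.enumerate (PySem.Str.lower jd).toList 0).foldl (fun s ic =>
        ((techPatterns.foldl (fun d kw2 =>
            (PySem.Dict.modify d ((PySem.Str.lower kw2).toList.headD ' ') []
              (fun ls => ls ++ [PySem.Str.lower kw2]))) PySem.Dict.empty).getD ic.2 []).foldl
          (fun s2 k => if PySem.Str.startswith (PySem.Str.slice (PySem.Str.lower jd) (some ic.1) none) k
                       then PySem.Set.add s2 k else s2) s) [])
      (PySem.Str.lower kw)
      = PySem.Str.isIn (PySem.Str.lower kw) (PySem.Str.lower jd) := by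
  set text := PySem.Str.lower jd with hl
  have hchar : ∀ (j : Int) (k : String), 0 ≤ j →
      (PySem.Str.startswith (PySem.Str.slice text (some j) none) k = true ↔
        k.toList <+: text.toList.drop j.toNat) := by
    intro j k hj
    rw [PySem.Str.startswith_eq, PySem.Chars.startswith_iff, PySem.Str.toList_slice,
      PySem.Chars.slice_eq_listSlice, PySem.List.slice_from _ hj]
  have hbucket : ∀ (c : Char) (y : String),
      y ∈ (techPatterns.foldl (fun d kw2 =>
            (PySem.Dict.modify d ((PySem.Str.lower kw2).toList.headD ' ') []
              (fun ls => ls ++ [PySem.Str.lower kw2]))) PySem.Dict.empty).getD c [] ↔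
        ∃ kw2 ∈ techPatterns, ((PySem.Str.lower kw2).toList.headD ' ' = c ∧ PySem.Str.lower kw2 = y) := by
    intro c y
    rw [getD_group techPatterns (fun kw2 => (PySem.Str.lower kw2).toList.headD ' ') PySem.Str.lower
      PySem.Dict.empty c]
    rw [PySem.Dict.getD_empty, List.nil_append, List.mem_map]
    constructor
    · rintro ⟨kw2, hmem, hval⟩
      rw [List.mem_filter] at hmem
      exact ⟨kw2, hmem.1, by simpa using hmem.2, hval⟩
    · rintro ⟨kw2, hmem, hkey, hval⟩
      exact ⟨kw2, List.mem_filter.mpr ⟨hmem, by simpa using hkey⟩, hval⟩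
  have henum : PySem.List.enumerate text.toList 0 =
      (PySem.List.pyRange 0 (text.toList.length : Int) 1).map
        (fun j => (j, PySem.List.pyGetD text.toList j ' ')) := by
    rw [PySem.List.enumerate_eq_map_pyRange (d := ' ')]
    simp [PySem.List.len_eq]
  have hne : (PySem.Str.lower kw).toList ≠ [] := techPatterns_lower_ne_nil kw hkw
  rw [henum]
  by_cases hin : PySem.Str.isIn (PySem.Str.lower kw) text = true
  · rw [hin, PySem.Set.contains_iff, mem_nested_fold]
    right
    have hiff := exists_pos_prefix_iff_isIn (PySem.Str.lower kw).toList text.toList hne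
    rw [PySem.Str.isIn] at hin
    obtain ⟨j, hjmem, hpre⟩ := hiff.mpr hin
    have hjr := PySem.List.mem_pyRange_one.mp hjmem
    have hj0 : 0 ≤ j := hjr.1
    have hjlen : j.toNat < text.toList.length := by omega
    have hdropeq : text.toList.drop j.toNat = text.toList[j.toNat] :: text.toList.drop (j.toNat + 1) :=
      List.drop_eq_getElem_cons hjlen
    have hhead : (PySem.Str.lower kw).toList.headD ' ' = text.toList[j.toNat] := by
      obtain ⟨h0, t0, hcons⟩ := List.exists_cons_of_ne_nil hne
      obtain ⟨rest, hrest⟩ := hpre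
      rw [hcons] at hrest ⊢
      rw [hdropeq] at hrest
      have hh0 : h0 = text.toList[j.toNat] := by
        have := congrArg (fun l => l.headD ' ') hrest
        simp only [List.headD_cons] at this
        exact this
      simpa using hh0
    have hgetd : PySem.List.pyGetD text.toList j ' ' = text.toList[j.toNat] := by
      apply PySem.List.pyGetD_eq_getElem
      · exact hj0
      · exact_mod_cast hjr.2
    refine ⟨(j, PySem.List.pyGetD text.toList j ' '), List.mem_map_of_mem hjmem,
      PySem.Str.lower kw, ?_, (hchar j _ hj0).mpr hpre, rfl⟩
    rw [hbucket]
    refine ⟨kw, hkw, ?_, rfl⟩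
    show (PySem.Str.lower kw).toList.headD ' ' = PySem.List.pyGetD text.toList j ' '
    rw [hgetd]
    exact hhead
  · have hf : PySem.Str.isIn (PySem.Str.lower kw) text = false := Bool.eq_false_iff.mpr hin
    rw [hf, Bool.eq_false_iff, Ne, PySem.Set.contains_iff, mem_nested_fold]
    rintro (h | ⟨ic, hicmem, k, hkmem, hC, heq⟩)
    · simp at h
    · subst heq
      obtain ⟨j, hjmem, hic⟩ := List.mem_map.mp hicmem
      have hj0 : 0 ≤ j := (PySem.List.mem_pyRange_one.mp hjmem).1
      have hC2 : PySem.Str.startswith (PySem.Str.slice text (some ic.1) none) (PySem.Str.lower kw) = true := hC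
      rw [← hic] at hC2
      have hpre := (hchar j _ hj0).mp hC2
      apply hin
      rw [PySem.Str.isIn]
      exact (exists_pos_prefix_iff_isIn _ _ hne).mp ⟨j, hjmem, hpre⟩

-- ===== VERDICT (by name: the statement is the Claim_ definition above) =====
set_option maxHeartbeats 2000000 in
theorem extract_job_keywords_spec : Claim_equal_extract_job_keywords := by
  intro jd _
  unfold Spec_extract_job_keywords extract_job_keywords extract_job_keywords_alt
  rw [kwList_eq]
  split_ifs with h
  · rfl
  · apply PySem.List.foldl_congr_mem
    intro acc kw hkw
    rw [contains_hit_iff jd kw hkw]
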